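-- pv_equiv track=rewrite | github.com/xogxog/SWEA | D3/1209.py | Max_diag_1
-- ===== SOURCE A (Python) =====
-- def Max_diag_1(is_max, ls):
--     max_diag_1 = 0
--     curr_row_total = 0
--     row = 0
--     col = 0
--     while col < len(ls):
--         curr_row_total += ls[row][col]
--         row += 1  # row 증가
--         col += 1  # col 증가
--         if max_diag_1 < curr_row_total:  # 최대값 넣어주기
--             max_diag_1 = curr_row_total
--
--     # 받아온 max값(is_max)과 새로 뽑은 max값 비교해서 큰값을 대각선 뽑는 함수로 넘겨줌.
--     if is_max > max_diag_1:
--         return Max_diag_2(is_max, ls)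
--     else:
--         return Max_diag_2(max_diag_1, ls)
--
-- def Max_diag_2(is_max, ls):
--     max_diag_2 = 0
--     curr_row_total = 0
--     row = len(ls) - 1  # 아래->위 방향으로 뽑을 것이므로 row를 최대로 줌
--     col = 0  # 왼 ->오 방향으로 갈것이므로 0
--     while col < len(ls):
--         curr_row_total += ls[row][col]
--         row -= 1  # 위로
--         col += 1  # 오른쪽으로
--         if max_diag_2 < curr_row_total:
--             max_diag_2 = curr_row_total
--     # 최종적으로 제일 큰값 return
--     if is_max > max_diag_2:
--         return is_max
--     else:
--         return max_diag_2
-- ===== SOURCE B (Python) =====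
-- def Max_diag_1(is_max, ls):
--     # Brute force: enumerate every prefix of each diagonal, sum it from scratch,
--     # and take one global max over all candidates (the empty prefix gives the 0 floor).
--     n = len(ls)
--     cands = [is_max]
--     for k in range(n + 1):
--         cands.append(sum(ls[i][i] for i in range(k)))
--     for k in range(n + 1):
--         cands.append(sum(ls[n - 1 - i][i] for i in range(k)))
--     return max(cands)
-- ===== Notes on version B (the rewrite author's own statement) =====
-- stated objective: alternative
-- what changed: Replaced A's two streaming while-loop functions (running sum with a running max threaded through Max_diag_2) by a brute-force enumeration: every prefix of each diagonal is summed independently from scratch and one global max is taken over all candidates together with is_max (the empty prefix supplies the 0 floor).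
import Mathlib
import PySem

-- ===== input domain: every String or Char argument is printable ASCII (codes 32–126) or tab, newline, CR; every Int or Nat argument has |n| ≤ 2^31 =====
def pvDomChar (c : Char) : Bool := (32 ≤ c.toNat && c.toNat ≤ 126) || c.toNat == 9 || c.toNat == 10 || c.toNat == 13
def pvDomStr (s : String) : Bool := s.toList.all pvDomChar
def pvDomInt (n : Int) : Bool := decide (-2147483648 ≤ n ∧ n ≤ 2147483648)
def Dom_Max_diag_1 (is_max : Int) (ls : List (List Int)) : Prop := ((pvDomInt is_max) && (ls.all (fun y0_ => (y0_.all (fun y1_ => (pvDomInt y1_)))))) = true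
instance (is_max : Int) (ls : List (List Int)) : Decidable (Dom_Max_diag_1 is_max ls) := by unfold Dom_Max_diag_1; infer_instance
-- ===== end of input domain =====

-- B replaces A's streaming running-max loops by brute-force enumeration of all diagonal
-- prefixes, each summed from scratch, with one global max (objective: alternative).

-- ===== PORT A =====
-- ls[row][col]; outside Pre_ the Python raises IndexError (pyGet? = none), default never reached inside Pre_
def pvVal (ls : List (List Int)) (r c : Int) : Int :=
  (PySem.List.pyGet? ((PySem.List.pyGet? ls r).getD []) c).getD 0

-- the while-loop of A's Max_diag_1: fuel = remaining iterations (n - col)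
def pvLoop1 (ls : List (List Int)) : Nat → Int → Int → Int → Int → Int
  | 0, _, _, _, best => best
  | k+1, row, col, curr, best =>
    let curr' := curr + pvVal ls row col
    pvLoop1 ls k (row + 1) (col + 1) curr' (if best < curr' then curr' else best)

-- the while-loop of A's Max_diag_2 (row decreasing)
def pvLoop2 (ls : List (List Int)) : Nat → Int → Int → Int → Int → Int
  | 0, _, _, _, best => best
  | k+1, row, col, curr, best =>
    let curr' := curr + pvVal ls row col
    pvLoop2 ls k (row - 1) (col + 1) curr' (if best < curr' then curr' else best)

def pvMaxDiag2 (is_max : Int) (ls : List (List Int)) : Int :=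
  let b := pvLoop2 ls ls.length ((ls.length : Int) - 1) 0 0 0
  if is_max > b then is_max else b

def Max_diag_1 (is_max : Int) (ls : List (List Int)) : Int :=
  let b := pvLoop1 ls ls.length 0 0 0 0
  if is_max > b then pvMaxDiag2 is_max ls else pvMaxDiag2 b ls

-- ===== PORT B =====
-- Source B: candidate list [is_max] ++ all diagonal prefix sums ++ all anti-diagonal prefix sums,
-- then Python's max over the (always nonempty) list; [] case is unreachable.
def Max_diag_1_alt (is_max : Int) (ls : List (List Int)) : Int :=
  let n := ls.length
  let cands := [is_max]
      ++ (List.range (n+1)).map (fun k => ((List.range k).map (fun (i : Nat) => pvVal ls (i : Int) (i : Int))).sum)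
      ++ (List.range (n+1)).map (fun k => ((List.range k).map (fun (i : Nat) => pvVal ls ((n : Int) - 1 - (i : Int)) (i : Int))).sum)
  match cands with
  | [] => 0
  | c :: cs => cs.foldl max c

-- ===== PRECONDITION & SPEC =====
-- Pre_: exactly the inputs where every diagonal and anti-diagonal access ls[i][i] / ls[n-1-i][i]
-- is in range; elsewhere Python A (and B) raise IndexError.
def Pre_Max_diag_1 (is_max : Int) (ls : List (List Int)) : Prop :=
  ∀ i ∈ List.range ls.length,
    i < (ls.getD i []).length ∧ i < (ls.getD (ls.length - 1 - i) []).length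
instance (is_max : Int) (ls : List (List Int)) : Decidable (Pre_Max_diag_1 is_max ls) := by
  unfold Pre_Max_diag_1; infer_instance

def pvWitness_Max_diag_1 : Int × List (List Int) := (2, [[1, -2], [3, 4]])

def Spec_Max_diag_1 (is_max : Int) (ls : List (List Int)) (out : Int) : Prop := out = Max_diag_1_alt is_max ls
instance (is_max : Int) (ls : List (List Int)) (out : Int) : Decidable (Spec_Max_diag_1 is_max ls out) := by unfold Spec_Max_diag_1; infer_instance

-- ===== CLAIM (what is proved, stated in full; the proofs are below) =====
def Claim_equal_Max_diag_1 : Prop := ∀ (is_max : Int) (ls : List (List Int)), Dom_Max_diag_1 is_max ls → Pre_Max_diag_1 is_max ls → Spec_Max_diag_1 is_max ls (Max_diag_1 is_max ls)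

-- ===== LEMMAS AND PROOFS =====

-- generic shape of A's loops over the list of visited values
def pvGo : List Int → Int → Int → Int
  | [], _, best => best
  | x :: xs, curr, best => pvGo xs (curr + x) (if best < curr + x then curr + x else best)

-- best prefix sum (including the empty prefix) of a list
def pvBp : List Int → Int
  | [] => 0
  | x :: xs => max 0 (x + pvBp xs)

theorem pvBp_nonneg : ∀ v : List Int, 0 ≤ pvBp v
  | [] => le_refl 0
  | _ :: _ => le_max_left _ _

theorem pvLoop1_eq_go (ls : List (List Int)) :
    ∀ (k : Nat) (row col curr best : Int),
      pvLoop1 ls k row col curr best =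
        pvGo ((List.range k).map (fun (i : Nat) => pvVal ls (row + (i : Int)) (col + (i : Int)))) curr best := by
  intro k
  induction k with
  | zero => intro row col curr best; simp [pvLoop1, pvGo]
  | succ k ih =>
    intro row col curr best
    have hL : (List.range (k+1)).map (fun (i : Nat) => pvVal ls (row + (i : Int)) (col + (i : Int)))
        = pvVal ls row col ::
          (List.range k).map (fun (i : Nat) => pvVal ls ((row + 1) + (i : Int)) ((col + 1) + (i : Int))) := by
      rw [List.range_succ_eq_map, List.map_cons, List.map_map]
      refine congrArg₂ List.cons (by norm_num) ?_
      apply List.map_congr_left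
      intro i _
      simp only [Function.comp_apply]
      congr 1 <;> push_cast <;> ring
    rw [hL, pvGo]
    simp only [pvLoop1]
    exact ih _ _ _ _

theorem pvLoop2_eq_go (ls : List (List Int)) :
    ∀ (k : Nat) (row col curr best : Int),
      pvLoop2 ls k row col curr best =
        pvGo ((List.range k).map (fun (i : Nat) => pvVal ls (row - (i : Int)) (col + (i : Int)))) curr best := by
  intro k
  induction k with
  | zero => intro row col curr best; simp [pvLoop2, pvGo]
  | succ k ih =>
    intro row col curr best
    have hL : (List.range (k+1)).map (fun (i : Nat) => pvVal ls (row - (i : Int)) (col + (i : Int)))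
        = pvVal ls row col ::
          (List.range k).map (fun (i : Nat) => pvVal ls ((row - 1) - (i : Int)) ((col + 1) + (i : Int))) := by
      rw [List.range_succ_eq_map, List.map_cons, List.map_map]
      refine congrArg₂ List.cons (by norm_num) ?_
      apply List.map_congr_left
      intro i _
      simp only [Function.comp_apply]
      congr 1 <;> push_cast <;> ring
    rw [hL, pvGo]
    simp only [pvLoop2]
    exact ih _ _ _ _

-- A's loop realises the best prefix sum, given the invariant curr ≤ best
theorem pvGo_eq_bp : ∀ (v : List Int) (curr best : Int), curr ≤ best →
    pvGo v curr best = max best (curr + pvBp v) := by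
  intro v
  induction v with
  | nil => intro curr best h; simp [pvGo, pvBp]; omega
  | cons x xs ih =>
    intro curr best h
    have hb : curr + x ≤ (if best < curr + x then curr + x else best) := by split <;> omega
    rw [pvGo, ih _ _ hb]
    have hnn := pvBp_nonneg xs
    simp only [pvBp]
    rw [Int.max_def, Int.max_def, Int.max_def]
    split_ifs <;> omega

-- prefix-sum list of v over k = 0 .. v.length
def pvPref (v : List Int) : List Int :=
  (List.range (v.length + 1)).map (fun k => (v.take k).sum)

theorem pvPref_cons (x : Int) (xs : List Int) :
    pvPref (x :: xs) = 0 :: (pvPref xs).map (fun s => x + s) := by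
  unfold pvPref
  rw [List.length_cons, List.range_succ_eq_map, List.map_cons, List.map_map, List.map_map]
  refine congrArg₂ List.cons rfl ?_
  apply List.map_congr_left
  intro k _
  simp [List.take_succ_cons, List.sum_cons]

theorem pvFoldlMax_max : ∀ (L : List Int) (a b : Int),
    L.foldl max (max a b) = max a (L.foldl max b) := by
  intro L
  induction L with
  | nil => intro a b; simp
  | cons y L ih =>
    intro a b
    simp only [List.foldl_cons]
    rw [max_assoc, ih]

theorem pvFoldlMax_map_add : ∀ (L : List Int) (x c : Int),
    (L.map (fun s => x + s)).foldl max (x + c) = x + L.foldl max c := by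
  intro L
  induction L with
  | nil => intro x c; simp
  | cons y L ih =>
    intro x c
    simp only [List.map_cons, List.foldl_cons]
    have hmx : max (x + c) (x + y) = x + max c y := by
      rw [Int.max_def, Int.max_def]; split_ifs <;> omega
    rw [hmx, ih]

theorem pvFoldlMax_pref : ∀ (v : List Int) (a : Int),
    (pvPref v).foldl max a = max a (pvBp v) := by
  intro v
  induction v with
  | nil => intro a; simp [pvPref, pvBp, List.range_succ]
  | cons x xs ih =>
    intro a
    rw [pvPref_cons]
    simp only [List.foldl_cons]
    rw [pvFoldlMax_max]
    have h0 : (0 : Int) = x + (-x) := by ring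
    rw [h0, pvFoldlMax_map_add, ih]
    simp only [pvBp]
    rw [Int.max_def, Int.max_def, Int.max_def, Int.max_def]
    split_ifs <;> omega

-- the port-B literal candidate lists are pvPref of the diagonal lists
theorem pvMapRange_eq_pref (n : Nat) (g : Nat → Int) :
    (List.range (n+1)).map (fun k => ((List.range k).map g).sum)
      = pvPref ((List.range n).map g) := by
  unfold pvPref
  rw [List.length_map, List.length_range]
  apply List.map_congr_left
  intro k hk
  rw [List.mem_range] at hk
  rw [← List.map_take, List.take_range, Nat.min_eq_left (by omega)]

-- ===== VERDICT (by name: the statement is the Claim_ definition above) =====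
theorem Max_diag_1_spec : Claim_equal_Max_diag_1 := by
  intro is_max ls _ _
  unfold Spec_Max_diag_1
  simp only [Max_diag_1, pvMaxDiag2, pvLoop1_eq_go, pvLoop2_eq_go, zero_add]
  simp only [Max_diag_1_alt]
  rw [pvMapRange_eq_pref, pvMapRange_eq_pref]
  simp only [List.cons_append, List.nil_append, List.foldl_append]
  rw [pvFoldlMax_pref, pvFoldlMax_pref]
  rw [pvGo_eq_bp _ 0 0 (le_refl 0), pvGo_eq_bp _ 0 0 (le_refl 0)]
  have h1 := pvBp_nonneg ((List.range ls.length).map (fun (i : Nat) => pvVal ls (i : Int) (i : Int)))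
  have h2 := pvBp_nonneg ((List.range ls.length).map (fun (i : Nat) => pvVal ls ((ls.length : Int) - 1 - (i : Int)) (i : Int)))
  rw [Int.max_def, Int.max_def, Int.max_def, Int.max_def]
  split_ifs <;> omega
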